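-- pv_equiv track=rewrite | github.com/hoanbka/advanced-algorithms | nbonacciDegree.py | nbonacciDegree
-- ===== SOURCE A (Python) =====
-- def nbonacciDegree(sequence):
--     s = sequence[0]
--
--     for i in range(1, len(sequence)):
--         if s == sequence[i]:
--             j = i
--             tmp = s
--
--             while j < len(sequence) - 1:
--                 tmp -= sequence[j - i]
--                 tmp += sequence[j]
--
--                 if tmp != sequence[j + 1]:
--                     break
--                 j +=1
--                 pass
--             if j == len(sequence) - 1:
--                 return i
--
--         s += sequence[i]
--     return -1
-- ===== SOURCE B (Python) =====
-- def nbonacciDegree(sequence):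
--     n = len(sequence)
--     for i in range(1, n):
--         if all(sequence[k] == sum(sequence[k - i:k]) for k in range(i, n)):
--             return i
--     return -1
-- ===== Notes on version B (the rewrite author's own statement) =====
-- stated objective: simpler
-- what changed: Replaces the running prefix sum plus sliding-window while-loop with a direct test: for each candidate degree i, check sequence[k] == sum(sequence[k-i:k]) for every k with all(), returning the first passing i.
import Mathlib
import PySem

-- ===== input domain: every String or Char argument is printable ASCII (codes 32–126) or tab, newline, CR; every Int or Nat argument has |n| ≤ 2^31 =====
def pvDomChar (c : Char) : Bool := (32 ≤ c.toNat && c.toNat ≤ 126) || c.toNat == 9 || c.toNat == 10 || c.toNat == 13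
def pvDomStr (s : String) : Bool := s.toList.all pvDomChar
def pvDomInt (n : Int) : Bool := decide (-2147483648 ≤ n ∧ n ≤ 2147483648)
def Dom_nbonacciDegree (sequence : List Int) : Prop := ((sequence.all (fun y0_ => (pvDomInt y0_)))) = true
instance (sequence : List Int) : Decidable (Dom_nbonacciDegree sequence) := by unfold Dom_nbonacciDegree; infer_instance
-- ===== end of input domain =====

-- B replaces A's running prefix sum + sliding-window while-loop by a direct per-degree
-- check sequence[k] == sum(sequence[k-i:k]) for all k; objective: simpler.

-- ===== PORT A =====
-- the inner `while j < len(sequence) - 1` loop of A; returns the final j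
def pvInnerA (sequence : List Int) (i j : Nat) (tmp : Int) : Nat :=
  if j < sequence.length - 1 then
    let tmp' := tmp - sequence.getD (j - i) 0 + sequence.getD j 0
    if tmp' ≠ sequence.getD (j + 1) 0 then j
    else pvInnerA sequence i (j + 1) tmp'
  else j
termination_by sequence.length - 1 - j

-- the outer `for i in range(1, len(sequence))` loop of A, carrying the running sum s
def pvOuterA (sequence : List Int) (i : Nat) (s : Int) : Int :=
  if i < sequence.length then
    (if s = sequence.getD i 0 then
      (let j := pvInnerA sequence i i s
       if j = sequence.length - 1 then (i : Int)
       else pvOuterA sequence (i + 1) (s + sequence.getD i 0))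
    else pvOuterA sequence (i + 1) (s + sequence.getD i 0))
  else -1
termination_by sequence.length - i

-- every index A reads is in range on nonempty input (Pre_), so getD _ 0 is exact there
def nbonacciDegree (sequence : List Int) : Int :=
  pvOuterA sequence 1 (sequence.getD 0 0)

-- ===== PORT B =====
-- all(sequence[k] == sum(sequence[k-i:k]) for k in range(i, n)); the slice has
-- nonnegative in-range bounds with k-i ≤ k, so drop/take is exact
def pvCheckB (sequence : List Int) (i : Nat) : Bool :=
  (List.range' i (sequence.length - i)).all
    (fun k => sequence.getD k 0 == ((sequence.drop (k - i)).take i).sum)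

def nbonacciDegree_alt (sequence : List Int) : Int :=
  match (List.range' 1 (sequence.length - 1)).find? (fun i => pvCheckB sequence i) with
  | some i => (i : Int)
  | none => -1

-- ===== PRECONDITION & SPEC =====
-- A raises IndexError (sequence[0]) on the empty list; that is the only input it raises on.
def Pre_nbonacciDegree (sequence : List Int) : Prop := sequence ≠ []
instance (sequence : List Int) : Decidable (Pre_nbonacciDegree sequence) := by
  unfold Pre_nbonacciDegree; infer_instance

def pvWitness_nbonacciDegree : List Int := [1, 1, 2, 3]

def Spec_nbonacciDegree (sequence : List Int) (out : Int) : Prop := out = nbonacciDegree_alt sequence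
instance (sequence : List Int) (out : Int) : Decidable (Spec_nbonacciDegree sequence out) := by unfold Spec_nbonacciDegree; infer_instance

-- ===== CLAIM (what is proved, stated in full; the proofs are below) =====
def Claim_equal_nbonacciDegree : Prop := ∀ (sequence : List Int), Dom_nbonacciDegree sequence → Pre_nbonacciDegree sequence → Spec_nbonacciDegree sequence (nbonacciDegree sequence)

-- ===== LEMMAS AND PROOFS =====

-- sum of the window sequence[k-i:k]
def wsum (seq : List Int) (i k : Nat) : Int := ((seq.drop (k - i)).take i).sum

-- the per-position n-bonacci check for degree i at position k
def Chk (seq : List Int) (i k : Nat) : Prop := seq.getD k 0 = wsum seq i k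

lemma sum_take_succ (seq : List Int) (n : Nat) (h : n < seq.length) :
    (seq.take (n + 1)).sum = (seq.take n).sum + seq.getD n 0 := by
  rw [List.take_add_one, List.getElem?_eq_getElem h]
  simp only [Option.toList_some, List.sum_append, List.sum_cons, List.sum_nil, add_zero,
    List.getD_eq_getElem?_getD, List.getElem?_eq_getElem h, Option.getD_some]

lemma slice_sum_right (seq : List Int) (a b : Nat) (hab : a ≤ b) (hb : b < seq.length) :
    ((seq.drop a).take (b + 1 - a)).sum = ((seq.drop a).take (b - a)).sum + seq.getD b 0 := by
  have h1 : b + 1 - a = (b - a) + 1 := by omega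
  have h2 : (seq.drop a)[b - a]? = seq[b]? := by
    rw [List.getElem?_drop]; congr 1; omega
  rw [h1, List.take_add_one, h2, List.getElem?_eq_getElem hb]
  simp only [Option.toList_some, List.sum_append, List.sum_cons, List.sum_nil, add_zero,
    List.getD_eq_getElem?_getD, List.getElem?_eq_getElem hb, Option.getD_some]

lemma slice_sum_left (seq : List Int) (a b : Nat) (hab : a < b) (ha : a < seq.length) :
    ((seq.drop a).take (b - a)).sum = seq.getD a 0 + ((seq.drop (a + 1)).take (b - (a + 1))).sum := by
  have h1 : seq.drop a = seq[a] :: seq.drop (a + 1) := List.drop_eq_getElem_cons ha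
  have h2 : b - a = (b - (a + 1)) + 1 := by omega
  rw [h1, h2, List.take_succ_cons]
  simp only [List.sum_cons, List.getD_eq_getElem?_getD, List.getElem?_eq_getElem ha,
    Option.getD_some]

lemma wsum_slide (seq : List Int) (i j : Nat) (hi : 1 ≤ i) (hij : i ≤ j) (hj : j < seq.length) :
    wsum seq i (j + 1) = wsum seq i j - seq.getD (j - i) 0 + seq.getD j 0 := by
  unfold wsum
  have h1 : ((seq.drop (j - i)).take (j - (j - i))).sum
      = seq.getD (j - i) 0 + ((seq.drop (j - i + 1)).take (j - (j - i + 1))).sum :=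
    slice_sum_left seq (j - i) j (by omega) (by omega)
  have e1 : j - (j - i) = i := by omega
  have e3 : j - (j - i + 1) = i - 1 := by omega
  have e2 : j - i + 1 = j + 1 - i := by omega
  rw [e1, e3, e2] at h1
  have h2 : ((seq.drop (j + 1 - i)).take (j + 1 - (j + 1 - i))).sum
      = ((seq.drop (j + 1 - i)).take (j - (j + 1 - i))).sum + seq.getD j 0 :=
    slice_sum_right seq (j + 1 - i) j (by omega) hj
  have e4 : j + 1 - (j + 1 - i) = i := by omega
  have e5 : j - (j + 1 - i) = i - 1 := by omega
  rw [e4, e5] at h2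
  rw [h2, h1]
  ring

lemma innerA_spec (seq : List Int) (i : Nat) (hi : 1 ≤ i) :
    ∀ n j tmp, seq.length - 1 - j = n → i ≤ j → j ≤ seq.length - 1 → tmp = wsum seq i j →
    (pvInnerA seq i j tmp = seq.length - 1 ↔
      ∀ k, j < k → k < seq.length → Chk seq i k) := by
  intro n
  induction n with
  | zero =>
    intro j tmp hn _ hj htmp
    have hje : j = seq.length - 1 := by omega
    rw [pvInnerA]
    rw [if_neg (by omega)]
    constructor
    · intro _ k hk1 hk2; exact absurd hk2 (by omega)
    · intro _; omega
  | succ m ih =>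
    intro j tmp hn hij hj htmp
    have hlt : j < seq.length - 1 := by omega
    rw [pvInnerA, if_pos hlt]
    have hslide : tmp - seq.getD (j - i) 0 + seq.getD j 0 = wsum seq i (j + 1) := by
      rw [htmp, ← wsum_slide seq i j hi hij (by omega)]
    by_cases hne : tmp - seq.getD (j - i) 0 + seq.getD j 0 ≠ seq.getD (j + 1) 0
    · rw [if_pos hne]
      constructor
      · intro h; exact absurd h (by omega)
      · intro h
        exfalso
        apply hne
        have hc := h (j + 1) (by omega) (by omega)
        unfold Chk at hc
        rw [hslide]
        exact hc.symm
    · rw [if_neg hne]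
      replace hne := not_not.mp hne
      have hihere : Chk seq i (j + 1) := by
        unfold Chk; rw [← hslide, hne]
      have := ih (j + 1) (tmp - seq.getD (j - i) 0 + seq.getD j 0)
        (by omega) (by omega) (by omega) hslide
      rw [this]
      constructor
      · intro h k hk1 hk2
        rcases Nat.lt_or_ge (j + 1) k with h' | h'
        · exact h k h' hk2
        · have : k = j + 1 := by omega
          rw [this]; exact hihere
      · intro h k hk1 hk2; exact h k (by omega) hk2

lemma chk_iff_pvCheckB (seq : List Int) (i : Nat) (hi : i ≤ seq.length) :
    pvCheckB seq i = true ↔ ∀ k, i ≤ k → k < seq.length → Chk seq i k := by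
  unfold pvCheckB
  rw [List.all_eq_true]
  constructor
  · intro h k hk1 hk2
    have hm : k ∈ List.range' i (seq.length - i) := by
      rw [List.mem_range'_1]; omega
    have := h k hm
    unfold Chk wsum
    exact beq_iff_eq.mp this
  · intro h k hm
    rw [List.mem_range'_1] at hm
    exact beq_iff_eq.mpr (h k (by omega) (by omega))

lemma wsum_self (seq : List Int) (i : Nat) : wsum seq i i = (seq.take i).sum := by
  unfold wsum
  simp

lemma outerA_spec (seq : List Int) :
    ∀ n i, seq.length - i = n → 1 ≤ i →
    pvOuterA seq i ((seq.take i).sum) =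
      (match (List.range' i (seq.length - i)).find? (fun d => pvCheckB seq d) with
       | some d => (d : Int)
       | none => -1) := by
  intro n
  induction n with
  | zero =>
    intro i hn hi
    rw [pvOuterA, if_neg (by omega)]
    have : seq.length - i = 0 := hn
    rw [this]
    simp
  | succ m ih =>
    intro i hn hi
    have hil : i < seq.length := by omega
    have hr : List.range' i (seq.length - i) = i :: List.range' (i + 1) m := by
      rw [hn, List.range'_succ]
    rw [pvOuterA, if_pos hil]
    have hsum : (seq.take i).sum + seq.getD i 0 = (seq.take (i + 1)).sum :=
      (sum_take_succ seq i hil).symm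
    have hinner := innerA_spec seq i hi (seq.length - 1 - i) i ((seq.take i).sum)
      rfl (le_refl i) (by omega) (wsum_self seq i).symm
    by_cases hs : (seq.take i).sum = seq.getD i 0
    · rw [if_pos hs]
      by_cases hj : pvInnerA seq i i ((seq.take i).sum) = seq.length - 1
      · rw [if_pos hj]
        have hcb : pvCheckB seq i = true := by
          rw [chk_iff_pvCheckB seq i (by omega)]
          intro k hk1 hk2
          rcases Nat.lt_or_ge i k with h' | h'
          · exact (hinner.mp hj) k h' hk2
          · have : k = i := by omega
            rw [this]
            unfold Chk
            rw [wsum_self, ← hs]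
        rw [hr, List.find?_cons_of_pos hcb]
      · rw [if_neg hj]
        have hcb : pvCheckB seq i = false := by
          by_contra hc
          have : pvCheckB seq i = true := by
            cases h : pvCheckB seq i
            · exact absurd h hc
            · rfl
          rw [chk_iff_pvCheckB seq i (by omega)] at this
          exact hj (hinner.mpr (fun k hk1 hk2 => this k (by omega) hk2))
        rw [hr, List.find?_cons_of_neg (by simp [hcb]), hsum,
          ih (i + 1) (by omega) (by omega)]
        have hm : seq.length - (i + 1) = m := by omega
        rw [hm]
    · rw [if_neg hs]
      have hcb : pvCheckB seq i = false := by
        by_contra hc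
        have hcb' : pvCheckB seq i = true := by
          cases h : pvCheckB seq i
          · exact absurd h hc
          · rfl
        rw [chk_iff_pvCheckB seq i (by omega)] at hcb'
        have := hcb' i (le_refl i) hil
        unfold Chk at this
        rw [wsum_self] at this
        exact hs this.symm
      rw [hr, List.find?_cons_of_neg (by simp [hcb]), hsum,
        ih (i + 1) (by omega) (by omega)]
      have hm : seq.length - (i + 1) = m := by omega
      rw [hm]

-- ===== VERDICT (by name: the statement is the Claim_ definition above) =====
theorem nbonacciDegree_spec : Claim_equal_nbonacciDegree := by
  intro seq _ hpre
  unfold Spec_nbonacciDegree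
  unfold nbonacciDegree nbonacciDegree_alt
  cases seq with
  | nil => exact absurd rfl hpre
  | cons a t =>
    have h0 : (a :: t).getD 0 0 = ((a :: t).take 1).sum := by simp
    rw [h0, outerA_spec (a :: t) ((a :: t).length - 1) 1 rfl (le_refl 1)]
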